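-- pv_equiv track=rewrite | github.com/dande7lion/pythonClasses | set2/2.13.py | total_length_of_words
-- ===== SOURCE A (Python) =====
-- def total_length_of_words(line):
--     if not isinstance(line, str):
--         raise TypeError("Invalid parameter!")
--     line = line.split()
--     total_length = 0
--     for word in line:
--         total_length += len(word)
--     return total_length
-- ===== SOURCE B (Python) =====
-- def total_length_of_words(line):
--     if not isinstance(line, str):
--         raise TypeError("Invalid parameter!")
--     return sum(1 for c in line if not c.isspace())
-- ===== Notes on version B (the rewrite author's own statement) =====
-- stated objective: simpler
-- what changed: Instead of splitting the string into a word list and summing word lengths, B counts the non-whitespace characters in one character-level pass, building no intermediate list.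
import Mathlib
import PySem

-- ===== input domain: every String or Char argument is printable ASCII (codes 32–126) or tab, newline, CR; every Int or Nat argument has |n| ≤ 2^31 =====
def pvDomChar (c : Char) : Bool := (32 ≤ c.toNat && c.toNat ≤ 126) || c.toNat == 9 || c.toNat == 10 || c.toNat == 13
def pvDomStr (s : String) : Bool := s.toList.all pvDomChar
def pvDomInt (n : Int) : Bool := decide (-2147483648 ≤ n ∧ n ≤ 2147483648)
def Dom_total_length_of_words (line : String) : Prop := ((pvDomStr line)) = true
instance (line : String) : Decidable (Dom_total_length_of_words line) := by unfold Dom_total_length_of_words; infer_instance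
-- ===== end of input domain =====

-- B counts non-whitespace characters in a single pass instead of splitting into words and summing word lengths; simpler, no intermediate list.


-- ===== PORT A =====
-- line.split(); total_length = 0; for word in line: total_length += len(word)
def total_length_of_words (line : String) : Int :=
  (PySem.Str.split₀ line).foldl (fun total_length word => total_length + (PySem.Str.len word : Int)) 0

-- ===== PORT B =====
-- sum(1 for c in line if not c.isspace())
def total_length_of_words_alt (line : String) : Int :=
  line.toList.foldl (fun acc c => if PySem.Chars.isspace c then acc else acc + 1) 0

-- ===== PRECONDITION & SPEC =====
def Spec_total_length_of_words (line : String) (out : Int) : Prop := out = total_length_of_words_alt line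
instance (line : String) (out : Int) : Decidable (Spec_total_length_of_words line out) := by unfold Spec_total_length_of_words; infer_instance

-- ===== CLAIM (what is proved, stated in full; the proofs are below) =====
def Claim_equal_total_length_of_words : Prop := ∀ (line : String), Dom_total_length_of_words line → Spec_total_length_of_words line (total_length_of_words line)

-- ===== LEMMAS AND PROOFS =====

-- B's fold counts the characters failing isspace.
theorem foldl_count_nonspace (cs : List Char) (n : Int) :
    cs.foldl (fun acc c => if PySem.Chars.isspace c then acc else acc + 1) n
      = n + ((cs.filter (fun c => !PySem.Chars.isspace c)).length : Int) := by
  induction cs generalizing n with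
  | nil => simp
  | cons c rest ih =>
    simp only [List.foldl_cons, List.filter_cons]
    by_cases h : PySem.Chars.isspace c = true
    · simp [h, ih]
    · simp only [h] at *
      simp [ih (n + 1)]
      omega

-- A's fold over the word list sums the word lengths.
theorem foldl_sum_len (ws : List String) (n : Int) :
    ws.foldl (fun total_length word => total_length + (PySem.Str.len word : Int)) n
      = n + (((ws.map String.toList).map List.length).sum : Int) := by
  induction ws generalizing n with
  | nil => simp
  | cons w rest ih =>
    simp only [List.foldl_cons, List.map_cons, List.sum_cons]
    rw [ih]
    simp only [PySem.Str.len]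
    push_cast
    ring

-- The invariant of split₀.go: total length of the produced pieces = pending word
-- length + accumulated pieces + non-space characters remaining in the input.
theorem split0_go_sum (s cur : List Char) (acc : List (List Char)) :
    ((PySem.Chars.split₀.go s cur acc).map List.length).sum
      = (acc.map List.length).sum + cur.length
          + (s.filter (fun c => !PySem.Chars.isspace c)).length := by
  induction s generalizing cur acc with
  | nil =>
    by_cases h : cur.isEmpty = true
    · simp [PySem.Chars.split₀.go, List.isEmpty_iff.mp h]
    · simp [PySem.Chars.split₀.go, h]
  | cons c rest ih =>
    by_cases h : PySem.Chars.isspace c = true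
    · by_cases hc : cur.isEmpty = true
      · simp [PySem.Chars.split₀.go, h, ih, List.isEmpty_iff.mp hc]
      · simp [PySem.Chars.split₀.go, h, hc, ih]
        omega
    · simp [PySem.Chars.split₀.go, h, ih (c :: cur) acc]
      omega

theorem split₀_sum (cs : List Char) :
    ((PySem.Chars.split₀ cs).map List.length).sum
      = (cs.filter (fun c => !PySem.Chars.isspace c)).length := by
  simpa using split0_go_sum cs [] []

-- ===== VERDICT (by name: the statement is the Claim_ definition above) =====
theorem total_length_of_words_spec : Claim_equal_total_length_of_words := by
  intro line _
  unfold Spec_total_length_of_words total_length_of_words total_length_of_words_alt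
  rw [foldl_sum_len, foldl_count_nonspace]
  simp [PySem.Str.split₀, split₀_sum, Function.comp_def]
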